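-- pv_equiv track=rewrite | github.com/stkirk/cs-guided-project-python-iii | src/demonstration_02.py | single_number_dumb
-- ===== SOURCE A (Python) =====
-- def single_number_dumb(nums):
--     for (i, num) in enumerate(nums):
--         count = 1 #we've seen this number once, increment if it happens again
--         # look through entire array and see if nums is duplicated
--         for j in range(i + 1, len(nums)):
--             if nums[j] == num:
--                 count += 1
--         if count == 1:
--                 return num
-- ===== SOURCE B (Python) =====
-- def single_number_dumb(nums):
--     # Single reverse pass: track values already seen to the right;
--     # the last value recorded with no later duplicate is the answer.
--     seen = set()
--     result = None
--     for num in reversed(nums):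
--         if num not in seen:
--             result = num
--         seen.add(num)
--     return result
-- ===== Notes on version B (the rewrite author's own statement) =====
-- stated objective: faster
-- what changed: Replaced A's nested forward counting of later occurrences with a single right-to-left pass maintaining a set of values seen to the right.
import Mathlib
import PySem

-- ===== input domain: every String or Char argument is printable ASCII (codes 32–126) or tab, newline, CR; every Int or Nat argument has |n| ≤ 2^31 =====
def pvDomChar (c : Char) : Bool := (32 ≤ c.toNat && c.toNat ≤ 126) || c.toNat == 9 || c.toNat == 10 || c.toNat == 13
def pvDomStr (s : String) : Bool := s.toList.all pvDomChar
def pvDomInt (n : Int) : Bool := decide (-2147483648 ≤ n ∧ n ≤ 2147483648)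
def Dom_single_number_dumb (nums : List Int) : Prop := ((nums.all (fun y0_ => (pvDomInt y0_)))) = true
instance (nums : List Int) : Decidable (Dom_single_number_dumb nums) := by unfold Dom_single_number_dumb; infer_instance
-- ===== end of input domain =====

-- B replaces A's nested forward counting with one right-to-left pass over a set of
-- values already seen to the right (objective: faster, O(n) instead of O(n^2)).

-- ===== PORT A =====
-- the outer 'for (i, num) in enumerate(nums)' with its early return; the inner
-- 'for j in range(i+1, len(nums))' counting loop is the foldl over pyRange.
-- nums[j] is ported as pyGetD (default 0): exact here since every j produced by
-- range(i+1, len(nums)) with i ≥ 0 is a valid index.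
def snLoop (nums : List Int) : List (Int × Int) → Option Int
  | [] => none
  | (i, num) :: rest =>
      let count : Int :=
        (PySem.List.pyRange (i + 1) (PySem.List.len nums)).foldl
          (fun c j => if PySem.List.pyGetD nums j 0 == num then c + 1 else c) 1
      if count == 1 then some num else snLoop nums rest

def single_number_dumb (nums : List Int) : Option Int :=
  snLoop nums (PySem.List.enumerate nums)

-- ===== PORT B =====
-- state = (seen, result); Python's 'for num in reversed(nums)' is the foldl over nums.reverse
def single_number_dumb_alt (nums : List Int) : Option Int :=
  (nums.reverse.foldl
    (fun st num =>
      (PySem.Set.add st.1 num,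
       if PySem.Set.contains st.1 num then st.2 else some num))
    ((PySem.Set.empty : PySem.Set Int), (none : Option Int))).2

-- ===== PRECONDITION & SPEC =====
def Spec_single_number_dumb (nums : List Int) (out : Option Int) : Prop := out = single_number_dumb_alt nums
instance (nums : List Int) (out : Option Int) : Decidable (Spec_single_number_dumb nums out) := by unfold Spec_single_number_dumb; infer_instance

-- ===== CLAIM (what is proved, stated in full; the proofs are below) =====
def Claim_equal_single_number_dumb : Prop := ∀ (nums : List Int), Dom_single_number_dumb nums → Spec_single_number_dumb nums (single_number_dumb nums)

-- ===== LEMMAS AND PROOFS =====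

-- common characterisation: the first element with no duplicate later in the list
def firstNoLater : List Int → Option Int
  | [] => none
  | x :: xs => if x ∈ xs then firstNoLater xs else some x

lemma snLoop_eq (pre suf : List Int) :
    snLoop (pre ++ suf) (PySem.List.enumerate suf (pre.length : Int)) = firstNoLater suf := by
  induction suf generalizing pre with
  | nil => simp [PySem.List.enumerate_nil, snLoop, firstNoLater]
  | cons x t ih =>
      rw [PySem.List.enumerate_cons, snLoop]
      have hlen : ((pre.length : Int) + 1).toNat = pre.length + 1 := by omega
      have hdrop : List.drop (pre.length + 1) (pre ++ x :: t) = t := by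
        rw [show pre ++ x :: t = (pre ++ [x]) ++ t by simp,
            show pre.length + 1 = (pre ++ [x]).length by simp]
        exact List.drop_left
      have hcount :
          (PySem.List.pyRange ((pre.length : Int) + 1) (PySem.List.len (pre ++ x :: t))).foldl
            (fun c j => if PySem.List.pyGetD (pre ++ x :: t) j 0 == x then c + 1 else c) 1
          = 1 + (t.countP (fun v => v == x) : Int) := by
        rw [PySem.List.foldl_pyRange_pyGetD (pre ++ x :: t) 0
              (fun c v => if v == x then c + 1 else c) 1 (by omega)]
        rw [hlen, hdrop]
        exact PySem.List.foldl_count_if (fun v => v == x) t 1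
      simp only [hcount]
      by_cases hx : x ∈ t
      · have hc : t.countP (fun v => v == x) ≠ 0 := by
          intro h0
          have := (List.countP_eq_zero.mp h0) x hx
          simp at this
        rw [if_neg (by simp only [beq_iff_eq]; omega)]
        have h2 : snLoop (pre ++ x :: t) (PySem.List.enumerate t ((pre.length : Int) + 1))
            = firstNoLater t := by simpa using ih (pre ++ [x])
        rw [h2]
        simp [firstNoLater, hx]
      · have hc : t.countP (fun v => v == x) = 0 := by
          rw [List.countP_eq_zero]
          intro a ha
          simp only [beq_iff_eq]
          intro h; exact hx (h ▸ ha)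
        rw [hc]
        simp [firstNoLater, hx]

lemma portA_eq (nums : List Int) : single_number_dumb nums = firstNoLater nums := by
  have := snLoop_eq [] nums
  simpa [single_number_dumb] using this

lemma bfold_eq (nums : List Int) :
    nums.reverse.foldl
      (fun st num =>
        (PySem.Set.add st.1 num,
         if PySem.Set.contains st.1 num then st.2 else some num))
      ((PySem.Set.empty : PySem.Set Int), (none : Option Int))
    = (PySem.Set.ofList nums.reverse, firstNoLater nums) := by
  induction nums with
  | nil => simp [PySem.Set.ofList, firstNoLater, PySem.Set.empty]
  | cons x t ih =>
      rw [List.reverse_cons, List.foldl_append, ih]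
      have hmem : PySem.Set.contains (PySem.Set.ofList t.reverse) x = decide (x ∈ t) := by
        simp [PySem.Set.contains, PySem.Set.mem_ofList]
      have hof : PySem.Set.ofList (t.reverse ++ [x]) = PySem.Set.add (PySem.Set.ofList t.reverse) x := by
        rw [PySem.Set.ofList_eq_foldl, PySem.Set.ofList_eq_foldl, List.foldl_append]
        rfl
      simp only [List.foldl_cons, List.foldl_nil, hmem, hof]
      by_cases hx : x ∈ t <;> simp [hx, firstNoLater, PySem.Set.ofList_eq_foldl]

lemma portB_eq (nums : List Int) : single_number_dumb_alt nums = firstNoLater nums := by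
  rw [single_number_dumb_alt, bfold_eq]

-- ===== VERDICT (by name: the statement is the Claim_ definition above) =====
theorem single_number_dumb_spec : Claim_equal_single_number_dumb := by
  intro nums _
  unfold Spec_single_number_dumb
  rw [portA_eq, portB_eq]
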